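-- pv_equiv track=rewrite | github.com/hendriklaue/QIBA-DRO-evaluation-tool | QIBA_table_model_T1.py | groupRefCalByRefValue
-- ===== SOURCE A (Python) =====
-- def groupRefCalByRefValue(ref_value_list, cal_value_list, number_of_instances_list, usable_instances_list, weights_list, sum_sqrs_list):
--     """Create a list that groups each (reference, calculated, number of instances, number of usable instances, weights) pair by reference value
--     For example, reference values of [7,2,1,9,7,2,4,1,1,5] and
--     calculated values of [8,9,8,3,6,1,0,2,3,6] will produce a list that looks like
--     [ [(1,8), (1,2), (1,3)], [(2,9), (2,1)], [(4,0)], [(5,6)], [(7,8), (7,6)], [(9,3)]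
--     """
--     all_unique_ref_values = list(set(ref_value_list)) #Remove duplicate elements from ref_value_list
--     all_unique_ref_values.sort()
--     full_list = []
--
--     for unique_ref_value in all_unique_ref_values:
--         unique_list = []
--         for i in range(0, len(ref_value_list)):
--             if ref_value_list[i] == unique_ref_value:
--                 ref_cal_tuple = (ref_value_list[i], cal_value_list[i], number_of_instances_list[i], usable_instances_list[i], weights_list[i], sum_sqrs_list[i])
--                 unique_list.append(ref_cal_tuple)
--         full_list.append(unique_list)
--     return full_list
-- ===== SOURCE B (Python) =====
-- def groupRefCalByRefValue(ref_value_list, cal_value_list, number_of_instances_list, usable_instances_list, weights_list, sum_sqrs_list):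
--     groups = {}
--     for row in zip(ref_value_list, cal_value_list, number_of_instances_list, usable_instances_list, weights_list, sum_sqrs_list):
--         groups.setdefault(row[0], []).append(row)
--     return [groups[key] for key in sorted(groups)]
-- ===== Notes on version B (the rewrite author's own statement) =====
-- stated objective: faster
-- what changed: B replaces A's pass over all N indices for every unique reference value with a single zip pass that groups rows into a dict keyed by reference value, then emits the groups in sorted-key order.
import Mathlib
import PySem

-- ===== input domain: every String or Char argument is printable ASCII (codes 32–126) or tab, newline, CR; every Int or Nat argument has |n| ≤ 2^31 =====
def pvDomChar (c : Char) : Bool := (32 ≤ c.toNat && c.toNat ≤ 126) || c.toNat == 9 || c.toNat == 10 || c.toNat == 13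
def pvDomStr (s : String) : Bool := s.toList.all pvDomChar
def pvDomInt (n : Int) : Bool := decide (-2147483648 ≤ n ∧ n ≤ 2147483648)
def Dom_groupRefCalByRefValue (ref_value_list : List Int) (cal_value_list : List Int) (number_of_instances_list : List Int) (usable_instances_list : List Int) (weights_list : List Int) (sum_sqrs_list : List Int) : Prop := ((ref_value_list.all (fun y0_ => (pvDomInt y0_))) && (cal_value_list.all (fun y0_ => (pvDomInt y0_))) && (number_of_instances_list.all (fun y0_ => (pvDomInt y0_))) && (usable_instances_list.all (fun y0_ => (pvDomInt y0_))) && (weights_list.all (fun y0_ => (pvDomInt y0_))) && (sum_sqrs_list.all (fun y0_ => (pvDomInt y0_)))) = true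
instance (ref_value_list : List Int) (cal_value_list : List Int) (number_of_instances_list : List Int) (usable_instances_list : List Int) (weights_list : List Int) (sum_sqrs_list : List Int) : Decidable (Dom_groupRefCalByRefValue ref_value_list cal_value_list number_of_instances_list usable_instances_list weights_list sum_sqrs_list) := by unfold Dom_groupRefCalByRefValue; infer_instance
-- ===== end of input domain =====

-- B replaces A's scan of all indices once per unique reference value with one zip pass
-- grouping rows into a dict keyed by reference value, emitted in sorted-key order (faster).

-- ===== PORT A =====
-- literal port of A: sorted(list(set(ref_value_list))), then for each unique value scan all
-- indices collecting matching 6-tuples; pyGetD is exact under Pre_ (out-of-range accesses,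
-- Python's IndexError, are outside the claim)
def groupRefCalByRefValue (ref_value_list : List Int) (cal_value_list : List Int) (number_of_instances_list : List Int) (usable_instances_list : List Int) (weights_list : List Int) (sum_sqrs_list : List Int) : List (List (Int × Int × Int × Int × Int × Int)) :=
  let all_unique_ref_values := PySem.List.sorted (PySem.Set.ofList ref_value_list) (fun x => x) false
  all_unique_ref_values.foldl (fun full_list unique_ref_value =>
    full_list ++ [(PySem.List.pyRange 0 (ref_value_list.length : Int) 1).foldl (fun unique_list i =>
      if PySem.List.pyGetD ref_value_list i 0 = unique_ref_value then
        unique_list ++ [(PySem.List.pyGetD ref_value_list i 0, PySem.List.pyGetD cal_value_list i 0,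
                         PySem.List.pyGetD number_of_instances_list i 0, PySem.List.pyGetD usable_instances_list i 0,
                         PySem.List.pyGetD weights_list i 0, PySem.List.pyGetD sum_sqrs_list i 0)]
      else unique_list) []]) []

-- ===== PORT B =====
-- literal port of B: one zip pass building a dict of groups (setdefault+append = Dict.modify),
-- then the groups in sorted-key order
def groupRefCalByRefValue_alt (ref_value_list : List Int) (cal_value_list : List Int) (number_of_instances_list : List Int) (usable_instances_list : List Int) (weights_list : List Int) (sum_sqrs_list : List Int) : List (List (Int × Int × Int × Int × Int × Int)) :=
  let rows := ref_value_list.zip (cal_value_list.zip (number_of_instances_list.zip (usable_instances_list.zip (weights_list.zip sum_sqrs_list))))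
  let groups : PySem.Dict Int (List (Int × Int × Int × Int × Int × Int)) :=
    rows.foldl (fun groups row => groups.modify row.1 [] (fun l => l ++ [row])) PySem.Dict.empty
  (PySem.List.sorted groups.keys (fun x => x) false).map (fun key => groups.getD key [])

-- ===== PRECONDITION & SPEC =====
-- Pre_ excludes exactly the inputs where A raises IndexError: some list shorter than ref_value_list
def Pre_groupRefCalByRefValue (ref_value_list : List Int) (cal_value_list : List Int) (number_of_instances_list : List Int) (usable_instances_list : List Int) (weights_list : List Int) (sum_sqrs_list : List Int) : Prop :=
  ref_value_list.length ≤ cal_value_list.length ∧ ref_value_list.length ≤ number_of_instances_list.length ∧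
  ref_value_list.length ≤ usable_instances_list.length ∧ ref_value_list.length ≤ weights_list.length ∧
  ref_value_list.length ≤ sum_sqrs_list.length
instance (ref_value_list : List Int) (cal_value_list : List Int) (number_of_instances_list : List Int) (usable_instances_list : List Int) (weights_list : List Int) (sum_sqrs_list : List Int) : Decidable (Pre_groupRefCalByRefValue ref_value_list cal_value_list number_of_instances_list usable_instances_list weights_list sum_sqrs_list) := by unfold Pre_groupRefCalByRefValue; infer_instance

def pvWitness_groupRefCalByRefValue : List Int × List Int × List Int × List Int × List Int × List Int :=
  ([7, 2, 7, 1], [8, 9, 6, 2], [1, 1, 1, 1], [1, 1, 0, 1], [2, 3, 4, 5], [0, 1, 4, 9])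

-- explicit DecidableEq of the result type (instance search needs it spelled out at this size)
def pvDeqOut : DecidableEq (List (List (Int × Int × Int × Int × Int × Int))) :=
  @instDecidableEqList _ (@instDecidableEqList _ (inferInstance : DecidableEq (Int × Int × Int × Int × Int × Int)))

def Spec_groupRefCalByRefValue (ref_value_list : List Int) (cal_value_list : List Int) (number_of_instances_list : List Int) (usable_instances_list : List Int) (weights_list : List Int) (sum_sqrs_list : List Int) (out : List (List (Int × Int × Int × Int × Int × Int))) : Prop := out = groupRefCalByRefValue_alt ref_value_list cal_value_list number_of_instances_list usable_instances_list weights_list sum_sqrs_list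
instance (ref_value_list : List Int) (cal_value_list : List Int) (number_of_instances_list : List Int) (usable_instances_list : List Int) (weights_list : List Int) (sum_sqrs_list : List Int) (out : List (List (Int × Int × Int × Int × Int × Int))) : Decidable (Spec_groupRefCalByRefValue ref_value_list cal_value_list number_of_instances_list usable_instances_list weights_list sum_sqrs_list out) := by unfold Spec_groupRefCalByRefValue; exact pvDeqOut _ _

-- ===== CLAIM (what is proved, stated in full; the proofs are below) =====
def Claim_equal_groupRefCalByRefValue : Prop := ∀ (ref_value_list : List Int) (cal_value_list : List Int) (number_of_instances_list : List Int) (usable_instances_list : List Int) (weights_list : List Int) (sum_sqrs_list : List Int), Dom_groupRefCalByRefValue ref_value_list cal_value_list number_of_instances_list usable_instances_list weights_list sum_sqrs_list → Pre_groupRefCalByRefValue ref_value_list cal_value_list number_of_instances_list usable_instances_list weights_list sum_sqrs_list → Spec_groupRefCalByRefValue ref_value_list cal_value_list number_of_instances_list usable_instances_list weights_list sum_sqrs_list (groupRefCalByRefValue ref_value_list cal_value_list number_of_instances_list usable_instances_list weights_list sum_sqrs_list)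


-- ===== LEMMAS AND PROOFS =====

-- pyGetD distributes over zip (in range on both sides)
theorem pv_pyGetD_zip {α β : Type} (xs : List α) (ys : List β) (i : Int) (d1 : α) (d2 : β)
    (h0 : 0 ≤ i) (hx : i < (xs.length : Int)) (hy : i < (ys.length : Int)) :
    PySem.List.pyGetD (xs.zip ys) i (d1, d2) = (PySem.List.pyGetD xs i d1, PySem.List.pyGetD ys i d2) := by
  have hz : i < ((xs.zip ys).length : Int) := by simp [List.length_zip]; omega
  rw [PySem.List.pyGetD_eq_getElem _ _ h0 hz, PySem.List.pyGetD_eq_getElem _ _ h0 hx,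
      PySem.List.pyGetD_eq_getElem _ _ h0 hy, List.getElem_zip]

-- the grouping dict: getD of the fold of modifies is the filter of the rows by key
theorem pv_getD_fold_modify (rows : List (Int × Int × Int × Int × Int × Int))
    (d0 : PySem.Dict Int (List (Int × Int × Int × Int × Int × Int))) (k : Int) :
    (rows.foldl (fun groups row => groups.modify row.1 [] (fun l => l ++ [row])) d0).getD k []
      = d0.getD k [] ++ rows.filter (fun row => row.1 == k) := by
  induction rows generalizing d0 with
  | nil => simp [List.foldl_nil, List.filter_nil]
  | cons row rows ih =>
    simp only [List.foldl_cons, ih, List.filter_cons]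
    rw [PySem.Dict.getD_modify]
    by_cases h : k = row.1
    · simp [h]
    · simp [h, beq_iff_eq, Ne.symm h]

-- keys of the grouping dict: membership is membership among the rows' reference values
theorem pv_mem_keys_fold_modify (rows : List (Int × Int × Int × Int × Int × Int))
    (d0 : PySem.Dict Int (List (Int × Int × Int × Int × Int × Int))) (k : Int) :
    k ∈ (rows.foldl (fun groups row => groups.modify row.1 [] (fun l => l ++ [row])) d0).keys
      ↔ k ∈ d0.keys ∨ k ∈ rows.map (·.1) := by
  induction rows generalizing d0 with
  | nil => simp [List.foldl_nil]
  | cons row rows ih =>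
    simp only [List.foldl_cons, ih, List.map_cons, List.mem_cons]
    rw [PySem.Dict.keys_modify, PySem.Dict.mem_keys_insert]
    tauto

-- keys of the grouping dict: no duplicates
theorem pv_nodup_keys_fold_modify (rows : List (Int × Int × Int × Int × Int × Int))
    (d0 : PySem.Dict Int (List (Int × Int × Int × Int × Int × Int))) (h : d0.keys.Nodup) :
    (rows.foldl (fun groups row => groups.modify row.1 [] (fun l => l ++ [row])) d0).keys.Nodup := by
  induction rows generalizing d0 with
  | nil => exact h
  | cons row rows ih =>
    refine ih _ ?_
    have hk : (d0.modify row.1 [] (fun l => l ++ [row])).keys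
        = (d0.insert row.1 ((fun l => l ++ [row]) (d0.getD row.1 []))).keys := PySem.Dict.keys_modify _ _ _ _
    rw [hk]
    exact PySem.Dict.nodup_keys_insert _ _ _ h

theorem pv_main (r c n u w s : List Int)
    (h1 : r.length ≤ c.length) (h2 : r.length ≤ n.length) (h3 : r.length ≤ u.length)
    (h4 : r.length ≤ w.length) (h5 : r.length ≤ s.length) :
    groupRefCalByRefValue r c n u w s = groupRefCalByRefValue_alt r c n u w s := by
  unfold groupRefCalByRefValue groupRefCalByRefValue_alt
  set rows := r.zip (c.zip (n.zip (u.zip (w.zip s)))) with hrows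
  set groups := rows.foldl (fun groups row => groups.modify row.1 [] (fun l => l ++ [row]))
      (PySem.Dict.empty : PySem.Dict Int (List (Int × Int × Int × Int × Int × Int))) with hgroups
  have hlen : rows.length = r.length := by
    simp [hrows, List.length_zip]; omega
  have hfst : rows.map (·.1) = r := by
    have hle : r.length ≤ (c.zip (n.zip (u.zip (w.zip s)))).length := by
      simp [List.length_zip]; omega
    simpa using List.map_fst_zip hle
  -- the inner per-unique-value scan of A is the filter of the rows
  have hinner : ∀ k : Int,
      (PySem.List.pyRange 0 (r.length : Int) 1).foldl (fun unique_list i =>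
        if PySem.List.pyGetD r i 0 = k then
          unique_list ++ [(PySem.List.pyGetD r i 0, PySem.List.pyGetD c i 0,
                           PySem.List.pyGetD n i 0, PySem.List.pyGetD u i 0,
                           PySem.List.pyGetD w i 0, PySem.List.pyGetD s i 0)]
        else unique_list) []
      = rows.filter (fun row => row.1 == k) := by
    intro k
    have hcong := PySem.List.foldl_congr_mem (PySem.List.pyRange 0 (r.length : Int) 1)
      (fun unique_list i =>
        if PySem.List.pyGetD r i 0 = k then
          unique_list ++ [(PySem.List.pyGetD r i 0, PySem.List.pyGetD c i 0,
                           PySem.List.pyGetD n i 0, PySem.List.pyGetD u i 0,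
                           PySem.List.pyGetD w i 0, PySem.List.pyGetD s i 0)]
        else unique_list)
      (fun acc j => (fun ul (row : Int × Int × Int × Int × Int × Int) =>
          if row.1 = k then ul ++ [row] else ul) acc (PySem.List.pyGetD rows j (0,0,0,0,0,0)))
      ([] : List (Int × Int × Int × Int × Int × Int))
      (by
        intro acc i hi
        rcases PySem.List.mem_pyRange_one.mp hi with ⟨hi0, hi1⟩
        have e1 := pv_pyGetD_zip r (c.zip (n.zip (u.zip (w.zip s)))) i 0 (0,0,0,0,0) hi0
          (by omega) (by simp [List.length_zip]; omega)
        have e2 := pv_pyGetD_zip c (n.zip (u.zip (w.zip s))) i 0 (0,0,0,0) hi0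
          (by omega) (by simp [List.length_zip]; omega)
        have e3 := pv_pyGetD_zip n (u.zip (w.zip s)) i 0 (0,0,0) hi0
          (by omega) (by simp [List.length_zip]; omega)
        have e4 := pv_pyGetD_zip u (w.zip s) i 0 (0,0) hi0
          (by omega) (by simp [List.length_zip]; omega)
        have e5 := pv_pyGetD_zip w s i 0 0 hi0 (by omega) (by omega)
        simp only [hrows, e1, e2, e3, e4, e5])
    rw [hcong]
    have : (r.length : Int) = (rows.length : Int) := by rw [hlen]
    rw [this, PySem.List.foldl_pyRange_zero_pyGetD' rows (0,0,0,0,0,0)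
      (fun ul (row : Int × Int × Int × Int × Int × Int) => if row.1 = k then ul ++ [row] else ul) []]
    rw [PySem.List.foldl_append_ite_eq_filter (fun (row : Int × Int × Int × Int × Int × Int) => row.1 = k)]
    rw [List.nil_append]
    exact List.filter_congr (fun x _ => by
      show decide (x.1 = k) = (x.1 == k)
      rfl)
  -- the sorted unique reference values are the sorted dict keys
  have hkeys : PySem.List.sorted (PySem.Set.ofList r) (fun x => x) false
      = PySem.List.sorted groups.keys (fun x => x) false := by
    apply PySem.List.sorted_eq_sorted_of_perm _ _ _ (fun a b hab => hab)
    rw [List.perm_ext_iff_of_nodup (PySem.Set.nodup_ofList r)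
      (pv_nodup_keys_fold_modify rows _ PySem.Dict.nodup_keys_empty)]
    intro k
    rw [PySem.Set.mem_ofList, pv_mem_keys_fold_modify]
    simp [PySem.Dict.keys_empty, hfst]
  rw [PySem.List.foldl_append_singleton_eq_map, List.nil_append, hkeys]
  refine List.map_congr_left ?_
  intro k _
  rw [hinner k, pv_getD_fold_modify, PySem.Dict.getD_empty, List.nil_append]

-- ===== VERDICT (by name: the statement is the Claim_ definition above) =====
theorem groupRefCalByRefValue_spec : Claim_equal_groupRefCalByRefValue := by
  intro r c n u w s _hdom hpre
  obtain ⟨h1, h2, h3, h4, h5⟩ := hpre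
  exact pv_main r c n u w s h1 h2 h3 h4 h5
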